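-- pv_equiv track=rewrite | github.com/posl/comment_recommendation | script/split_gen/2_time/zh/230_A/9.py | solve
-- ===== SOURCE A (Python) =====
-- def solve(s, k):
--     n = len(s)
--     ans = 0
--     for i in range(n):
--         if s[i] == 'X':
--             ans += 1
--     for i in range(n - 1):
--         if s[i] == 'X' and s[i + 1] == 'X':
--             ans -= 1
--     for i in range(n):
--         if s[i] == '.':
--             if i > 0 and s[i - 1] == 'X':
--                 ans += 1
--             if i < n - 1 and s[i + 1] == 'X':
--                 ans += 1
--     ans = min(ans + k * 2, n)
--     return ans
-- ===== SOURCE B (Python) =====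
-- def solve(s, k):
--     n = len(s)
--     ans = 0
--     i = 0
--     prev = None
--     while i < n:
--         c = s[i]
--         j = i + 1
--         while j < n and s[j] == c:
--             j += 1
--         if c == 'X':
--             ans += 1
--             if prev == '.':
--                 ans += 1
--             if j < n and s[j] == '.':
--                 ans += 1
--         prev = c
--         i = j
--     return min(ans + 2 * k, n)
-- ===== Notes on version B (the rewrite author's own statement) =====
-- stated objective: alternative
-- what changed: A makes three per-character index passes (count X's, subtract adjacent XX pairs, add dot/X adjacencies); B scans maximal runs of equal characters, skipping each whole run with an inner loop and scoring one per X-run plus one for each '.' neighbour of the run, then applies the same min(ans+2k, n) cap.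
import Mathlib
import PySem

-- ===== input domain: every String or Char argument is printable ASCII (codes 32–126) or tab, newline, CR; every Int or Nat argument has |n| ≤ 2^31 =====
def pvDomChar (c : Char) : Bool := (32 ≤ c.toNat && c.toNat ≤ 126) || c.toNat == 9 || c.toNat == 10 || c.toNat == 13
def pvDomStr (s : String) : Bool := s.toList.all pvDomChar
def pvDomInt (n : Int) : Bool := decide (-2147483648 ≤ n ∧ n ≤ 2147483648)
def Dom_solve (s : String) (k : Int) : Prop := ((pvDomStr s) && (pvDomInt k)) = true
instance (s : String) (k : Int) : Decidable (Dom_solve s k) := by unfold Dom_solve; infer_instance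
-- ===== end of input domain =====

-- B replaces A's three per-character index passes by a scan over maximal runs of equal
-- characters: each run is skipped in one inner step, an 'X' run scores 1 plus 1 per '.'
-- neighbour of the run; objective: alternative (return value only).

-- ===== PORT A =====
-- three loops over range(n), range(n-1), range(n), exactly as in Source A
def solve (s : String) (k : Int) : Int :=
  let cs := s.toList
  let n : Int := PySem.Str.len s
  let ans1 : Int := (PySem.List.pyRange 0 n 1).foldl
    (fun acc i => if PySem.List.pyGetD cs i ' ' = 'X' then acc + 1 else acc) 0
  let ans2 : Int := (PySem.List.pyRange 0 (n - 1) 1).foldl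
    (fun acc i => if PySem.List.pyGetD cs i ' ' = 'X' ∧ PySem.List.pyGetD cs (i + 1) ' ' = 'X'
                  then acc - 1 else acc) ans1
  let ans3 : Int := (PySem.List.pyRange 0 n 1).foldl
    (fun acc i => if PySem.List.pyGetD cs i ' ' = '.' then
        (let acc' := if 0 < i ∧ PySem.List.pyGetD cs (i - 1) ' ' = 'X' then acc + 1 else acc
         if i < n - 1 ∧ PySem.List.pyGetD cs (i + 1) ' ' = 'X' then acc' + 1 else acc')
      else acc) ans2
  min (ans3 + k * 2) n

-- ===== PORT B =====
-- Source B's outer while-loop over run starts, ported as recursion on the remaining suffix;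
-- the inner while-loop that skips the run ('j += 1 while s[j] == c') is List.dropWhile,
-- 'prev' is the character just before the suffix (None at the start), exactly as in Source B.
def goRuns (prev : Option Char) (cs : List Char) : Int :=
  match cs with
  | [] => 0
  | c :: t =>
    let rest := t.dropWhile (· = c)
    let add : Int := if c = 'X' then
        1 + (if prev = some '.' then 1 else 0) + (if rest.head? = some '.' then 1 else 0)
      else 0
    add + goRuns (some c) rest
termination_by cs.length
decreasing_by
  simp only [List.length_cons]
  exact Nat.lt_succ_of_le (List.length_dropWhile_le _ _)

def solve_alt (s : String) (k : Int) : Int :=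
  min (goRuns none s.toList + 2 * k) (PySem.Str.len s)

-- ===== PRECONDITION & SPEC =====
def Spec_solve (s : String) (k : Int) (out : Int) : Prop := out = solve_alt s k
instance (s : String) (k : Int) (out : Int) : Decidable (Spec_solve s k out) := by unfold Spec_solve; infer_instance

-- ===== CLAIM (what is proved, stated in full; the proofs are below) =====
def Claim_equal_solve : Prop := ∀ (s : String) (k : Int), Dom_solve s k → Spec_solve s k (solve s k)

-- ===== LEMMAS AND PROOFS =====

-- normal forms of the two programs' uncapped counts
def s1 (cs : List Char) : Int :=
  ∑ j ∈ Finset.range cs.length, (if cs.getD j ' ' = 'X' then (1 : Int) else 0)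
def s2 (cs : List Char) : Int :=
  ∑ j ∈ Finset.range (cs.length - 1),
    (if cs.getD j ' ' = 'X' ∧ cs.getD (j + 1) ' ' = 'X' then (1 : Int) else 0)
def s3 (cs : List Char) : Int :=
  ∑ j ∈ Finset.range cs.length,
    ((if cs.getD j ' ' = '.' ∧ 0 < j ∧ cs.getD (j - 1) ' ' = 'X' then (1 : Int) else 0) +
     (if cs.getD j ' ' = '.' ∧ j + 1 < cs.length ∧ cs.getD (j + 1) ' ' = 'X' then (1 : Int) else 0))
def uPair (a b : Char) : Int :=
  (if b = 'X' ∧ a ≠ 'X' then (1 : Int) else 0) +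
  (if a = 'X' ∧ b = '.' then (1 : Int) else 0) +
  (if a = '.' ∧ b = 'X' then (1 : Int) else 0)
def hd1 (cs : List Char) : Int := if 0 < cs.length ∧ cs.getD 0 ' ' = 'X' then 1 else 0
def uSum (cs : List Char) : Int :=
  ∑ j ∈ Finset.range (cs.length - 1), uPair (cs.getD j ' ') (cs.getD (j + 1) ' ')
def uSumL : List Char → Int
  | a :: b :: t => uPair a b + uSumL (b :: t)
  | _ => 0

lemma sum_pyRange_nat (m : Nat) (f : Int → Int) :
    ((PySem.List.pyRange 0 (m : Int) 1).map f).sum = ∑ j ∈ Finset.range m, f (j : Int) := by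
  rw [PySem.List.pyRange_one]
  norm_num [List.map_map, Function.comp_def]
  rfl

lemma sum_pyRange_pred (m : Nat) (f : Int → Int) :
    ((PySem.List.pyRange 0 ((m : Int) - 1) 1).map f).sum = ∑ j ∈ Finset.range (m - 1), f (j : Int) := by
  rcases m with _ | m
  · simp [PySem.List.pyRange_one_eq_nil]
  · have : ((m + 1 : Nat) : Int) - 1 = (m : Int) := by push_cast; ring
    rw [this, sum_pyRange_nat]
    simp

lemma loop1_eq (cs : List Char) (n : Int) (hn : n = (cs.length : Int)) (init : Int) :
    (PySem.List.pyRange 0 n 1).foldl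
      (fun acc i => if PySem.List.pyGetD cs i ' ' = 'X' then acc + 1 else acc) init
    = init + s1 cs := by
  subst hn
  have hb : (fun (acc : Int) (i : Int) => if PySem.List.pyGetD cs i ' ' = 'X' then acc + 1 else acc)
      = (fun acc i => acc + (if PySem.List.pyGetD cs i ' ' = 'X' then (1:Int) else 0)) := by
    funext acc i; split_ifs <;> ring
  rw [hb, PySem.List.foldl_add, sum_pyRange_nat]
  unfold s1
  simp

lemma loop2_eq (cs : List Char) (n : Int) (hn : n = (cs.length : Int)) (init : Int) :
    (PySem.List.pyRange 0 (n - 1) 1).foldl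
      (fun acc i => if PySem.List.pyGetD cs i ' ' = 'X' ∧ PySem.List.pyGetD cs (i + 1) ' ' = 'X'
                    then acc - 1 else acc) init
    = init - s2 cs := by
  subst hn
  have hb : (fun (acc : Int) (i : Int) =>
        if PySem.List.pyGetD cs i ' ' = 'X' ∧ PySem.List.pyGetD cs (i + 1) ' ' = 'X' then acc - 1 else acc)
      = (fun acc i => acc + (if PySem.List.pyGetD cs i ' ' = 'X' ∧ PySem.List.pyGetD cs (i + 1) ' ' = 'X'
          then (-1:Int) else 0)) := by
    funext acc i; split_ifs <;> ring
  rw [hb, PySem.List.foldl_add, sum_pyRange_pred]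
  have hpt : ∀ j ∈ Finset.range (cs.length - 1),
      (if PySem.List.pyGetD cs (j : Int) ' ' = 'X' ∧ PySem.List.pyGetD cs ((j : Int) + 1) ' ' = 'X'
        then (-1:Int) else 0)
      = -(if cs.getD j ' ' = 'X' ∧ cs.getD (j + 1) ' ' = 'X' then (1 : Int) else 0) := by
    intro j _
    have h1 : ((j : Int) + 1) = ((j + 1 : Nat) : Int) := by push_cast; ring
    rw [h1]
    simp only [PySem.List.pyGetD_natCast]
    split_ifs <;> simp
  rw [Finset.sum_congr rfl hpt, Finset.sum_neg_distrib]
  unfold s2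
  ring

lemma loop3_eq (cs : List Char) (n : Int) (hn : n = (cs.length : Int)) (init : Int) :
    (PySem.List.pyRange 0 n 1).foldl
      (fun acc i => if PySem.List.pyGetD cs i ' ' = '.' then
          (if i < n - 1 ∧ PySem.List.pyGetD cs (i + 1) ' ' = 'X' then
             (if 0 < i ∧ PySem.List.pyGetD cs (i - 1) ' ' = 'X' then acc + 1 else acc) + 1
           else if 0 < i ∧ PySem.List.pyGetD cs (i - 1) ' ' = 'X' then acc + 1 else acc)
        else acc) init
    = init + s3 cs := by
  subst hn
  have hb : (fun (acc : Int) (i : Int) => if PySem.List.pyGetD cs i ' ' = '.' then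
          (if i < (cs.length : Int) - 1 ∧ PySem.List.pyGetD cs (i + 1) ' ' = 'X' then
             (if 0 < i ∧ PySem.List.pyGetD cs (i - 1) ' ' = 'X' then acc + 1 else acc) + 1
           else if 0 < i ∧ PySem.List.pyGetD cs (i - 1) ' ' = 'X' then acc + 1 else acc)
        else acc)
      = (fun acc i => acc +
          ((if PySem.List.pyGetD cs i ' ' = '.' ∧ 0 < i ∧ PySem.List.pyGetD cs (i - 1) ' ' = 'X' then (1:Int) else 0) +
           (if PySem.List.pyGetD cs i ' ' = '.' ∧ i < (cs.length : Int) - 1 ∧ PySem.List.pyGetD cs (i + 1) ' ' = 'X' then (1:Int) else 0))) := by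
    funext acc i
    dsimp only
    split_ifs <;> (simp_all; try ring)
  rw [hb, PySem.List.foldl_add, sum_pyRange_nat]
  unfold s3
  congr 1
  apply Finset.sum_congr rfl
  intro j hj
  rcases j with _ | j
  · simp [pysem]
  · have e0 : (0:Int) < ((j+1 : Nat) : Int) := by positivity
    have e1 : ((j+1 : Nat) : Int) - 1 = (j : Int) := by push_cast; ring
    have e2 : ((j+1 : Nat) : Int) + 1 = ((j+2 : Nat) : Int) := by push_cast; ring
    have e3 : (((j+1 : Nat) : Int) < (cs.length : Int) - 1) ↔ ((j+1) + 1 < cs.length) := by omega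
    rw [e1, e2]
    simp only [e0, e3, true_and, PySem.List.pyGetD_natCast]
    norm_num

lemma solve_eq_sums (s : String) (k : Int) :
    solve s k = min (s1 s.toList - s2 s.toList + s3 s.toList + k * 2) (s.toList.length : Int) := by
  simp only [solve]
  rw [loop1_eq s.toList (PySem.Str.len s) (by simp),
      loop2_eq s.toList (PySem.Str.len s) (by simp),
      loop3_eq s.toList (PySem.Str.len s) (by simp),
      PySem.Str.len_eq]
  congr 1
  ring

lemma uPair_self (c : Char) : uPair c c = 0 := by
  unfold uPair
  by_cases h : c = 'X'
  · subst h; simp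
  · simp [h]

lemma uSum_cons (a b : Char) (t : List Char) :
    uSum (a :: b :: t) = uPair a b + uSum (b :: t) := by
  unfold uSum
  simp only [List.length_cons, Nat.add_sub_cancel]
  rw [Finset.sum_range_succ']
  simp
  ring

lemma uSum_eq_uSumL (cs : List Char) : uSum cs = uSumL cs := by
  match cs with
  | [] => simp [uSum, uSumL]
  | [a] => simp [uSum, uSumL]
  | a :: b :: t =>
    rw [uSum_cons, uSum_eq_uSumL (b :: t)]
    rfl

lemma hd1_cons (c : Char) (t : List Char) : hd1 (c :: t) = if c = 'X' then 1 else 0 := by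
  unfold hd1
  simp

-- main characterisation of B's run scanner: provided prev is not the head character
-- (true at every recursive call), goRuns counts one per X-run plus X/dot boundary pairs
lemma goRuns_eq (n : Nat) : ∀ (cs : List Char) (prev : Option Char), cs.length ≤ n →
    (∀ p, prev = some p → cs.head? ≠ some p) →
    goRuns prev cs
      = hd1 cs + (if prev = some '.' ∧ cs.head? = some 'X' then 1 else 0) + uSumL cs := by
  induction n with
  | zero =>
    intro cs prev hlen _
    have : cs = [] := by
      cases cs with
      | nil => rfl
      | cons c t => simp at hlen
    subst this
    simp [goRuns, hd1, uSumL]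
  | succ n ih =>
    intro cs prev hlen hne
    match cs with
    | [] => simp [goRuns, hd1, uSumL]
    | [c] =>
      rw [goRuns]
      simp only [List.dropWhile_nil, List.head?_nil, List.head?_cons]
      rw [goRuns]
      rw [hd1_cons]
      by_cases hc : c = 'X' <;> by_cases hp : prev = some '.' <;>
        simp_all [uSumL] <;> ring
    | c :: d :: t =>
      by_cases hdc : d = c
      · -- the head run continues: collapsing step
        subst hdc
        have h1 : goRuns prev (d :: d :: t) = goRuns prev (d :: t) := by
          rw [goRuns]
          conv_rhs => rw [goRuns]
          simp [List.dropWhile_cons]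
        rw [h1, ih (d :: t) prev (by simp at hlen ⊢; omega) (by simpa using hne)]
        simp only [uSumL, uPair_self, hd1_cons, List.head?_cons]
        ring
      · -- a new run starts at d
        have h1 : goRuns prev (c :: d :: t)
            = (if c = 'X' then
                1 + (if prev = some '.' then 1 else 0) + (if d = '.' then 1 else 0)
              else 0) + goRuns (some c) (d :: t) := by
          rw [goRuns]
          simp [List.dropWhile_cons, hdc]
        rw [h1, ih (d :: t) (some c) (by simp at hlen ⊢; omega)
              (by intro p hp; simp at hp; subst hp; simp [hdc])]
        simp only [uSumL, hd1_cons, List.head?_cons, uPair]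
        by_cases hc : c = 'X' <;> by_cases hd' : d = 'X' <;>
          by_cases hdd : d = '.' <;> by_cases hcd : c = '.' <;>
          by_cases hp : prev = some '.' <;> simp_all <;> ring

lemma sums_eq (cs : List Char) : s1 cs - s2 cs + s3 cs = hd1 cs + uSum cs := by
  unfold s1 s2 s3 hd1 uSum
  rcases h : cs.length with _ | m
  · simp [h]
  · simp only [Nat.add_sub_cancel]
    rw [Finset.sum_range_succ']
    rw [Finset.sum_add_distrib]
    rw [Finset.sum_range_succ']
    rw [Finset.sum_range_succ]
    have hA : ∀ j ∈ Finset.range m,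
        (if cs.getD (j+1) ' ' = '.' ∧ 0 < j+1 ∧ cs.getD (j+1-1) ' ' = 'X' then (1:Int) else 0)
        = (if cs.getD j ' ' = 'X' ∧ cs.getD (j+1) ' ' = '.' then (1:Int) else 0) := by
      intro j _
      simp only [Nat.add_sub_cancel, Nat.zero_lt_succ, true_and]
      split_ifs <;> simp_all
    have hB : ∀ j ∈ Finset.range m,
        (if cs.getD j ' ' = '.' ∧ j+1 < m+1 ∧ cs.getD (j+1) ' ' = 'X' then (1:Int) else 0)
        = (if cs.getD j ' ' = '.' ∧ cs.getD (j+1) ' ' = 'X' then (1:Int) else 0) := by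
      intro j hj
      simp only [Finset.mem_range] at hj
      have : j + 1 < m + 1 := by omega
      simp [this]
    rw [Finset.sum_congr rfl hA, Finset.sum_congr rfl hB]
    have hfirst : (if cs.getD 0 ' ' = '.' ∧ 0 < 0 ∧ cs.getD (0-1) ' ' = 'X' then (1:Int) else 0) = 0 := by
      simp
    have hlast : (if cs.getD m ' ' = '.' ∧ m+1 < m+1 ∧ cs.getD (m+1) ' ' = 'X' then (1:Int) else 0) = 0 := by
      simp
    rw [hfirst, hlast]
    have hcomb : ∑ j ∈ Finset.range m, (if cs.getD (j+1) ' ' = 'X' then (1:Int) else 0)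
        - ∑ j ∈ Finset.range m, (if cs.getD j ' ' = 'X' ∧ cs.getD (j+1) ' ' = 'X' then (1:Int) else 0)
        + (∑ j ∈ Finset.range m, (if cs.getD j ' ' = 'X' ∧ cs.getD (j+1) ' ' = '.' then (1:Int) else 0)
         + ∑ j ∈ Finset.range m, (if cs.getD j ' ' = '.' ∧ cs.getD (j+1) ' ' = 'X' then (1:Int) else 0))
        = ∑ j ∈ Finset.range m, uPair (cs.getD j ' ') (cs.getD (j+1) ' ') := by
      rw [← Finset.sum_sub_distrib, ← Finset.sum_add_distrib, ← Finset.sum_add_distrib]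
      apply Finset.sum_congr rfl
      intro j _
      have hup : uPair (cs.getD j ' ') (cs.getD (j+1) ' ')
          = (if cs.getD (j+1) ' ' = 'X' ∧ cs.getD j ' ' ≠ 'X' then (1:Int) else 0) +
            (if cs.getD j ' ' = 'X' ∧ cs.getD (j+1) ' ' = '.' then (1:Int) else 0) +
            (if cs.getD j ' ' = '.' ∧ cs.getD (j+1) ' ' = 'X' then (1:Int) else 0) := rfl
      rw [hup]
      by_cases h1 : cs.getD (j+1) ' ' = 'X' <;> by_cases h2 : cs.getD j ' ' = 'X' <;>
        simp_all <;> ring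
    have hhd : (if 0 < m + 1 ∧ cs.getD 0 ' ' = 'X' then (1:Int) else 0)
        = (if cs.getD 0 ' ' = 'X' then (1:Int) else 0) := by simp
    rw [hhd]
    linarith [hcomb]

-- ===== VERDICT (by name: the statement is the Claim_ definition above) =====
theorem solve_spec : Claim_equal_solve := by
  intro s k _
  unfold Spec_solve solve_alt
  rw [goRuns_eq s.toList.length s.toList none le_rfl (by simp),
      ← uSum_eq_uSumL, solve_eq_sums, sums_eq, PySem.Str.len_eq]
  simp only [false_and, reduceCtorEq, if_false]
  congr 1
  ring
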